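-- pv_equiv track=rewrite | github.com/Zhynem/csc506 | module1/crit_think_code.py | identify_pivot
-- ===== SOURCE A (Python) =====
-- from typing import List
--
-- def identify_swap_value(pivot_num: int, seen_nums: List[int]) -> int:
--     """
--     Given a number and the list of seen numbers return the next largest number
--     Takes parameter pivot_num (value to compare against) and seen_nums (values to consider)
--     Returns an int of the next largest number
--     """
--     # Start by sorting the list of numbers
--     seen_nums = sorted(seen_nums)
--     # Iterate through the numbers until the first ocurrence of the value being larger than the pivot
--     # number
--     for n in seen_nums:
--         if n > pivot_num:
--             return n
--     # It should never get here, but just in case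
--     return -99
--
-- def identify_pivot(starting_value: List[int]) -> (int, int):
--     """
--     Given a list of numbers identify the rightmost digit containing larger digits to the right of it
--     (ie. identify_pivot([5,6,4,7,3,8,2,9,0,1]) would return index 8 pointing to value 0, since
--     index 9 with a 1 in it is larger and it's the rightmost occurence of it)
--     Takes parameter starting_value as a list of integers representing the starting 10 digit number
--     Returns a tuple containing (pivot_index, swap_num) as they are both useful to the algorithm
--     If no pivot is found it will return (-99, -99)
--     """
--     # Reverse the list to look from the right side to the left in terms of digit order, but in an
--     # order that's easier to program with
--     # Need to do a deep copy of the list so it doesn't reverse the original number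
--     value_copy = [n for n in starting_value]
--     value_copy.reverse()
--     seen_nums = []
--     for i, current_num in enumerate(value_copy):
--         # Check if the number is smaller than any value seen so far
--         if any([current_num < seen_num for seen_num in seen_nums]):
--             # Convert the pivot back to indexing on the non-reversed list and send the number to swap with as well
--             return 9 - i, identify_swap_value(current_num, seen_nums)
--         seen_nums.append(current_num)
--     return -99, -99
-- ===== SOURCE B (Python) =====
-- from typing import List
--
-- def identify_pivot(starting_value: List[int]) -> (int, int):
--     # One right-to-left pass tracking the running maximum instead of rescanning
--     # a seen-list with any(); the swap value is found by a single min-scan of the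
--     # suffix instead of sorting.
--     best = None
--     i = 0
--     for cur in reversed(starting_value):
--         if best is not None and cur < best:
--             swap = best
--             for x in starting_value[len(starting_value) - i:]:
--                 if cur < x < swap:
--                     swap = x
--             return 9 - i, swap
--         if best is None or cur > best:
--             best = cur
--         i += 1
--     return -99, -99
-- ===== Notes on version B (the rewrite author's own statement) =====
-- stated objective: faster
-- what changed: B makes one right-to-left pass tracking the running maximum instead of rescanning a growing seen-list with any(), and finds the swap value with a single min-scan of the suffix instead of sorting the seen-list.
import Mathlib
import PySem

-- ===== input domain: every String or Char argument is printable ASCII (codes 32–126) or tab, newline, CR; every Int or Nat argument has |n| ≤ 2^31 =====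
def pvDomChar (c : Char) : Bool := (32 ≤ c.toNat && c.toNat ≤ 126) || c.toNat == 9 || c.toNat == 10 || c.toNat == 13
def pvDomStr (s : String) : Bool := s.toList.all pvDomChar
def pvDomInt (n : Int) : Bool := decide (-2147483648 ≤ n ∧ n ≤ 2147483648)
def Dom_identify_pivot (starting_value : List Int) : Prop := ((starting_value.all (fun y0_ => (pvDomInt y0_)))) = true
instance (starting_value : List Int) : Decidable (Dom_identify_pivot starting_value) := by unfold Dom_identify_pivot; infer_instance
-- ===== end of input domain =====

-- B replaces A's any()-rescan of a growing seen-list (plus a sort for the swap value)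
-- with one right-to-left pass tracking the running maximum and a single min-scan of the
-- suffix; measured asymptotically faster (O(n) vs O(n^2)).


-- ===== PORT A =====
-- for n in sorted(seen_nums): if n > pivot_num: return n ... return -99
def isv_loop (pivot_num : Int) : List Int → Int
  | [] => -99
  | n :: rest => if pivot_num < n then n else isv_loop pivot_num rest

def identify_swap_value (pivot_num : Int) (seen_nums : List Int) : Int :=
  isv_loop pivot_num (PySem.List.sorted seen_nums (fun x => x) false)

-- for i, current_num in enumerate(value_copy): ...
def ipA_loop : Nat → List Int → List Int → Int × Int
  | _, [], _ => (-99, -99)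
  | i, c :: rest, seen =>
    if seen.any (fun s => decide (c < s)) then
      (9 - (i : Int), identify_swap_value c seen)
    else ipA_loop (i + 1) rest (seen ++ [c])

def identify_pivot (starting_value : List Int) : Int × Int :=
  ipA_loop 0 starting_value.reverse []

-- ===== PORT B =====
-- one pass over reversed(starting_value) with running maximum `best`;
-- the inner `for x in starting_value[len-i:]` min-scan is the foldl.
def ipB_loop (xs : List Int) : Nat → List Int → Option Int → Int × Int
  | _, [], _ => (-99, -99)
  | i, cur :: rest, best =>
    match best with
    | some b =>
      if cur < b then
        (9 - (i : Int),
         (xs.drop (xs.length - i)).foldl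
           (fun s x => if cur < x ∧ x < s then x else s) b)
      else ipB_loop xs (i + 1) rest (some (if b < cur then cur else b))
    | none => ipB_loop xs (i + 1) rest (some cur)

def identify_pivot_alt (starting_value : List Int) : Int × Int :=
  ipB_loop starting_value 0 starting_value.reverse none

-- ===== PRECONDITION & SPEC =====
def Spec_identify_pivot (starting_value : List Int) (out : Int × Int) : Prop := out = identify_pivot_alt starting_value
instance (starting_value : List Int) (out : Int × Int) : Decidable (Spec_identify_pivot starting_value out) := by unfold Spec_identify_pivot; infer_instance

-- ===== CLAIM (what is proved, stated in full; the proofs are below) =====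
def Claim_equal_identify_pivot : Prop := ∀ (starting_value : List Int), Dom_identify_pivot starting_value → Spec_identify_pivot starting_value (identify_pivot starting_value)

-- ===== LEMMAS AND PROOFS =====

-- running maximum of `seen` as B maintains it
def maxO : List Int → Option Int
  | [] => none
  | s :: t => some (t.foldl max s)

lemma foldl_max_spec : ∀ (t : List Int) (s : Int),
    t.foldl max s ∈ s :: t ∧ ∀ y ∈ s :: t, y ≤ t.foldl max s := by
  intro t
  induction t with
  | nil => intro s; simp
  | cons x t' ih =>
    intro s
    obtain ⟨hmem, hbd⟩ := ih (max s x)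
    constructor
    · simp only [List.foldl_cons]
      rcases List.mem_cons.1 hmem with h | h
      · rw [h]; rcases max_choice s x with hc | hc <;> simp [hc]
      · simp [h]
    · intro y hy
      simp only [List.foldl_cons]
      rcases List.mem_cons.1 hy with rfl | hy'
      · exact le_trans (le_max_left y x) (hbd _ (by simp))
      · rcases List.mem_cons.1 hy' with rfl | hy''
        · exact le_trans (le_max_right s y) (hbd _ (by simp))
        · exact hbd y (by simp [hy''])

lemma any_eq_maxO (c : Int) (seen : List Int) (b : Int) (hb : maxO seen = some b) :
    seen.any (fun s => decide (c < s)) = decide (c < b) := by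
  cases seen with
  | nil => simp [maxO] at hb
  | cons s t =>
    simp only [maxO, Option.some.injEq] at hb
    subst hb
    obtain ⟨hmem, hbd⟩ := foldl_max_spec t s
    by_cases h : c < t.foldl max s
    · simp only [h, decide_true]
      exact List.any_eq_true.2 ⟨_, hmem, by simpa using h⟩
    · simp only [h, decide_false]
      refine List.any_eq_false.2 ?_
      intro y hy
      simp only [decide_eq_true_eq]
      intro hcy
      exact h (lt_of_lt_of_le hcy (hbd y hy))

-- B's inner min-scan: characterisation of the foldl
lemma fold_min_spec (c : Int) : ∀ (L : List Int) (b : Int),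
    let r := L.foldl (fun s x => if c < x ∧ x < s then x else s) b
    (r = b ∨ (r ∈ L ∧ c < r)) ∧ r ≤ b ∧ ∀ x ∈ L, c < x → r ≤ x := by
  intro L
  induction L with
  | nil => intro b; simp
  | cons x t ih =>
    intro b
    simp only [List.foldl_cons]
    by_cases h : c < x ∧ x < b
    · rw [if_pos h]
      obtain ⟨hcase, hle, hmin⟩ := ih x
      refine ⟨?_, le_of_lt (lt_of_le_of_lt hle h.2), ?_⟩
      · rcases hcase with h0 | ⟨hm, hc⟩
        · exact Or.inr ⟨by simp [h0], by rw [h0]; exact h.1⟩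
        · exact Or.inr ⟨by simp [hm], hc⟩
      · intro y hy hcy
        rcases List.mem_cons.1 hy with h0 | hy'
        · exact h0 ▸ hle
        · exact hmin y hy' hcy
    · rw [if_neg h]
      obtain ⟨hcase, hle, hmin⟩ := ih b
      refine ⟨?_, hle, ?_⟩
      · rcases hcase with h0 | ⟨hm, hc⟩
        · exact Or.inl h0
        · exact Or.inr ⟨by simp [hm], hc⟩
      · intro y hy hcy
        rcases List.mem_cons.1 hy with h0 | hy'
        · subst h0
          rcases not_and_or.1 h with h1 | h1
          · exact absurd hcy h1
          · exact le_trans hle (le_of_not_gt h1)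
        · exact hmin y hy' hcy

-- A's swap helper: first element > c of an ascending list is the minimum such element
lemma isv_spec (c : Int) : ∀ (L : List Int), L.Pairwise (· ≤ ·) →
    (∃ x ∈ L, c < x) →
    isv_loop c L ∈ L ∧ c < isv_loop c L ∧ ∀ x ∈ L, c < x → isv_loop c L ≤ x := by
  intro L
  induction L with
  | nil => intro _ h; simp at h
  | cons x t ih =>
    intro hpw hex
    rcases List.pairwise_cons.1 hpw with ⟨hxle, hpw'⟩
    by_cases h : c < x
    · simp only [isv_loop, if_pos h]
      refine ⟨by simp, h, ?_⟩
      intro y hy _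
      rcases List.mem_cons.1 hy with h0 | hy'
      · exact h0.ge
      · exact hxle y hy'
    · simp only [isv_loop, if_neg h]
      have hex' : ∃ y ∈ t, c < y := by
        obtain ⟨y, hy, hcy⟩ := hex
        rcases List.mem_cons.1 hy with rfl | hy'
        · exact absurd hcy h
        · exact ⟨y, hy', hcy⟩
      obtain ⟨h1, h2, h3⟩ := ih hpw' hex'
      refine ⟨by simp [h1], h2, ?_⟩
      intro y hy hcy
      rcases List.mem_cons.1 hy with rfl | hy'
      · exact absurd hcy h
      · exact h3 y hy' hcy

-- equality of the two swap values at the pivot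
lemma swap_eq (c b : Int) (seen : List Int) (hb : maxO seen = some b) (hcb : c < b) :
    identify_swap_value c seen
      = seen.reverse.foldl (fun s x => if c < x ∧ x < s then x else s) b := by
  cases seen with
  | nil => simp [maxO] at hb
  | cons s t =>
    simp only [maxO, Option.some.injEq] at hb
    obtain ⟨hbmem, hbbd⟩ := foldl_max_spec t s
    rw [hb] at hbmem hbbd
    have hsortpw := PySem.List.sorted_pairwise (s :: t) (fun x => x)
    have hexsorted : ∃ x ∈ PySem.List.sorted (s :: t) (fun x => x) false, c < x :=
      ⟨b, (PySem.List.mem_sorted _ _ _ _).2 hbmem, hcb⟩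
    obtain ⟨ha1, ha2, ha3⟩ := isv_spec c _ hsortpw hexsorted
    obtain ⟨hc1, hc2, hc3⟩ := fold_min_spec c (s :: t).reverse b
    have hAmem : isv_loop c (PySem.List.sorted (s :: t) (fun x => x) false) ∈ (s :: t) :=
      (PySem.List.mem_sorted _ _ _ _).1 ha1
    have hBmem : (s :: t).reverse.foldl (fun s x => if c < x ∧ x < s then x else s) b ∈ (s :: t) := by
      rcases hc1 with h0 | ⟨hm, _⟩
      · rw [h0]; exact hbmem
      · exact List.mem_reverse.1 hm
    have hBgt : c < (s :: t).reverse.foldl (fun s x => if c < x ∧ x < s then x else s) b := by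
      rcases hc1 with h0 | ⟨_, hc⟩
      · rw [h0]; exact hcb
      · exact hc
    have h1 := ha3 _ ((PySem.List.mem_sorted _ _ _ _).2 hBmem) hBgt
    have h2 := hc3 _ (List.mem_reverse.2 hAmem) ha2
    exact le_antisymm h1 h2

-- main loop invariant: A's loop over `rest` with accumulated `seen` equals
-- B's loop with the running maximum of `seen`
lemma loop_eq (xs : List Int) : ∀ (rest seen : List Int),
    xs.reverse = seen ++ rest →
    ipA_loop seen.length rest seen = ipB_loop xs seen.length rest (maxO seen) := by
  intro rest
  induction rest with
  | nil =>
    intro seen _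
    cases h : maxO seen <;> simp [ipA_loop, ipB_loop]
  | cons c rest' ih =>
    intro seen hinv
    cases hmo : maxO seen with
    | none =>
      have hseen : seen = [] := by cases seen <;> simp_all [maxO]
      subst hseen
      have := ih [c] (by simpa using hinv)
      simpa [ipA_loop, ipB_loop, maxO] using this
    | some b =>
      have hany := any_eq_maxO c seen b hmo
      simp only [ipA_loop, ipB_loop, hany]
      by_cases hcb : c < b
      · simp only [hcb, decide_true, if_true]
        have hxs : xs = (c :: rest').reverse ++ seen.reverse := by
          have := congrArg List.reverse hinv
          simpa [List.reverse_append] using this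
        have hdrop : xs.drop (xs.length - seen.length) = seen.reverse := by
          have hlen : xs.length - seen.length = ((c :: rest').reverse).length := by
            rw [hxs]; simp; omega
          rw [hlen, hxs, List.drop_left]
        rw [hdrop, swap_eq c b seen hmo hcb]
      · simp only [hcb, decide_false, Bool.false_eq_true, if_false]
        have hmo' : maxO (seen ++ [c]) = some (if b < c then c else b) := by
          cases seen with
          | nil => simp [maxO] at hmo
          | cons s t =>
            simp only [maxO, Option.some.injEq] at hmo
            simp only [List.cons_append, maxO, List.foldl_append, List.foldl_cons,
              List.foldl_nil, hmo, Option.some.injEq]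
            rcases max_choice b c with h | h <;>
              simp [max_def] at h ⊢ <;> omega
        have := ih (seen ++ [c]) (by simpa using hinv)
        simpa [hmo'] using this

-- ===== VERDICT (by name: the statement is the Claim_ definition above) =====
theorem identify_pivot_spec : Claim_equal_identify_pivot := by
  intro xs _
  show identify_pivot xs = identify_pivot_alt xs
  have := loop_eq xs xs.reverse [] (by simp)
  simpa [identify_pivot, identify_pivot_alt, maxO] using this
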